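-- pv_equiv track=rewrite | github.com/NeedMoreDoggos/homework | HW_04.14_Скоропупов/доделать_95.py | new_sen
-- ===== SOURCE A (Python) =====
-- def where_punct(string):
--     string = string.strip()
--     punct = ' .?!'
--     punct_in = [symbol in punct for symbol in string]
--     return punct_in
--
-- def new_sen(string):
--     capitals = list()
--     punct = where_punct(string)
--     for i in range(len(punct)-1):
--         if punct[i]:
--             for j in range(i+1, len(string)):
--                 if string[j] != ' ':
--                     capitals += [True]
--                     break
--         capitals += [False]
--     return capitals
-- ===== SOURCE B (Python) =====
-- def new_sen(string):
--     out = []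
--     for c in string.strip()[:-1]:
--         if c in ' .?!':
--             out.append(True)
--         out.append(False)
--     return out
-- ===== Notes on version B (the rewrite author's own statement) =====
-- stated objective: faster
-- what changed: A rescans the original string after every punctuation position looking for a non-space; because the string is stripped first such a non-space always exists before the last position, so B is one plain pass over the stripped string minus its last character with no inner scan at all.
import Mathlib
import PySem

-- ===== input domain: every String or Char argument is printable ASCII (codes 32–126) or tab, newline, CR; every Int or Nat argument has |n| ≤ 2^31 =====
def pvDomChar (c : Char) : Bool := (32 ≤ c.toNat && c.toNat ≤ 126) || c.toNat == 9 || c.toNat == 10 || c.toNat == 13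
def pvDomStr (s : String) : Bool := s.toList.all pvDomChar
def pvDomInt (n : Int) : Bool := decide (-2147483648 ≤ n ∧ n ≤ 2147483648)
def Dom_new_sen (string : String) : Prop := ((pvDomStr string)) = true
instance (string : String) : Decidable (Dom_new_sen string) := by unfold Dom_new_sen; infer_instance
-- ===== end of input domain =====

-- B drops A's per-position rescan of the original string entirely: since the string is
-- stripped first, a non-space always follows every position before the last, so B is a
-- single pass over the stripped string minus its last character.


-- ===== PORT A =====
-- where_punct: strip, then flag each char of the STRIPPED string as ' .?!'-membership
-- ('symbol in punct' for a single char is exactly char membership in the char list).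
def pvWherePunct (string : String) : List Bool :=
  ((PySem.Str.strip string).toList).map (fun c => decide (c ∈ (" .?!".toList)))

-- A's inner loop: 'for j in range(i+1, len(string)): if string[j] != ' ': capitals += [True]; break'
-- (string[j] is always in range there, so pyGetD with any default is exact).
def pvInnerA (cs : List Char) : List Int → List Bool
  | [] => []
  | j :: rest => if PySem.List.pyGetD cs j ' ' ≠ ' ' then [true] else pvInnerA cs rest

def new_sen (string : String) : List Bool :=
  let punct := pvWherePunct string
  (PySem.List.pyRange 0 ((punct.length : Int) - 1)).foldl
    (fun capitals i =>
      (if PySem.List.pyGetD punct i false = true then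
        capitals ++ pvInnerA string.toList (PySem.List.pyRange (i + 1) (PySem.Str.len string))
      else capitals) ++ [false]) []

-- ===== PORT B =====
-- Source B: for c in string.strip()[:-1]: if c in ' .?!': out.append(True); out.append(False)
def new_sen_alt (string : String) : List Bool :=
  (PySem.Chars.slice (PySem.Str.strip string).toList none (some (-1))).foldl
    (fun out c => (if c ∈ (" .?!".toList) then out ++ [true] else out) ++ [false]) []

-- ===== PRECONDITION & SPEC =====
def Spec_new_sen (string : String) (out : List Bool) : Prop := out = new_sen_alt string
instance (string : String) (out : List Bool) : Decidable (Spec_new_sen string out) := by unfold Spec_new_sen; infer_instance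

-- ===== CLAIM (what is proved, stated in full; the proofs are below) =====
def Claim_equal_new_sen : Prop := ∀ (string : String), Dom_new_sen string → Spec_new_sen string (new_sen string)

-- ===== LEMMAS AND PROOFS =====

-- Last index of the original string holding a char ≠ ' ' (or -1): characterises A's inner scan.
def pvLast (cs : List Char) : Int :=
  (PySem.List.enumerate cs 0).foldl (fun last kc => if kc.2 ≠ ' ' then kc.1 else last) (-1)

theorem pvEnumerate_append {α : Type} (xs : List α) (c : α) (s : Int) :
    PySem.List.enumerate (xs ++ [c]) s = PySem.List.enumerate xs s ++ [((s + xs.length : Int), c)] := by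
  induction xs generalizing s <;> simp_all [PySem.List.enumerate]; omega

theorem pvLast_append (cs : List Char) (c : Char) :
    pvLast (cs ++ [c]) = if c ≠ ' ' then (cs.length : Int) else pvLast cs := by
  simp [pvLast, pvEnumerate_append]

theorem pvLast_lt (cs : List Char) : pvLast cs < (cs.length : Int) := by
  induction cs using List.reverseRecOn with
  | nil => simp [pvLast, PySem.List.enumerate]
  | append_singleton cs c ih =>
      rw [pvLast_append]
      by_cases h : c = ' '
      · simp [h]
        omega
      · simp [h]

theorem pvInnerA_append (cs : List Char) (l1 l2 : List Int) :
    pvInnerA cs (l1 ++ l2) =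
      if pvInnerA cs l1 = [] then pvInnerA cs l2 else pvInnerA cs l1 := by
  induction l1 with
  | nil => simp [pvInnerA]
  | cons j rest ih =>
      by_cases h : PySem.List.pyGetD cs j ' ' ≠ ' ' <;> simp [pvInnerA, h, ih]

theorem pvInnerA_congr (cs cs' : List Char) (js : List Int)
    (h : ∀ j ∈ js, PySem.List.pyGetD cs j ' ' = PySem.List.pyGetD cs' j ' ') :
    pvInnerA cs js = pvInnerA cs' js := by
  induction js with
  | nil => rfl
  | cons j rest ih =>
      simp only [pvInnerA, h j (by simp)]
      exact if_congr Iff.rfl rfl (ih (fun x hx => h x (by simp [hx])))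

-- A's inner scan from i+1 returns [true] exactly when i < pvLast cs.
theorem pvInnerA_eq_last (cs : List Char) (i : Int) (hi : -1 ≤ i) :
    pvInnerA cs (PySem.List.pyRange (i + 1) (cs.length : Int)) =
      if i < pvLast cs then [true] else [] := by
  induction cs using List.reverseRecOn generalizing i with
  | nil =>
      rw [PySem.List.pyRange_one_eq_nil (by simp; omega)]
      have h := pvLast_lt ([] : List Char)
      simp only [List.length_nil, Int.natCast_zero] at h
      simp [pvInnerA, if_neg (by omega : ¬ i < pvLast ([] : List Char))]
  | append_singleton cs c ih =>
      by_cases hlen : i < (cs.length : Int)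
      · rw [show ((cs ++ [c]).length : Int) = (cs.length : Int) + 1 by simp,
          PySem.List.pyRange_one_append (i + 1) (cs.length : Int) ((cs.length : Int) + 1)
            (by omega) (by omega),
          pvInnerA_append]
        have hcongr : pvInnerA (cs ++ [c]) (PySem.List.pyRange (i + 1) (cs.length : Int)) =
            pvInnerA cs (PySem.List.pyRange (i + 1) (cs.length : Int)) := by
          refine pvInnerA_congr _ _ _ (fun j hj => ?_)
          rw [PySem.List.mem_pyRange_one] at hj
          rw [PySem.List.pyGetD_eq_getElem (cs ++ [c]) ' ' (by omega) (by simp; omega),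
            PySem.List.pyGetD_eq_getElem cs ' ' (by omega) (by omega)]
          rw [List.getElem_append_left (by omega)]
        rw [hcongr, ih i hi, PySem.List.pyRange_one_singleton, pvLast_append]
        have hc : PySem.List.pyGetD (cs ++ [c]) (cs.length : Int) ' ' = c := by
          rw [PySem.List.pyGetD_eq_getElem (cs ++ [c]) ' ' (by omega) (by simp)]
          simp
        by_cases hsp : c = ' '
        · simp only [hsp, if_neg (by simp : ¬ (' ' : Char) ≠ ' ')]
          by_cases hlt : i < pvLast cs <;> simp [pvInnerA, hlt]
        · simp only [if_pos (by simpa using hsp : (c : Char) ≠ ' '), if_pos hlen]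
          by_cases hlt : i < pvLast cs <;> simp [pvInnerA, hlt, hsp]
      · rw [PySem.List.pyRange_one_eq_nil (by simp; omega)]
        have h := pvLast_lt (cs ++ [c])
        simp only [List.length_append, List.length_cons, List.length_nil] at h
        simp only [pvInnerA]
        rw [if_neg (by omega)]

theorem pvIsspace_space : PySem.Chars.isspace ' ' = true := by decide

theorem pvRstrip_append_space (x : List Char) :
    PySem.Chars.rstrip (x ++ [' ']) = PySem.Chars.rstrip x := by
  simp [PySem.Chars.rstrip, pvIsspace_space]

theorem pvStrip_append_space (cs : List Char) :
    PySem.Chars.strip (cs ++ [' ']) = PySem.Chars.strip cs := by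
  simp only [PySem.Chars.strip, PySem.Chars.lstrip, List.dropWhile_append]
  by_cases h : (List.dropWhile PySem.Chars.isspace cs).isEmpty = true
  · simp [List.dropWhile, pvIsspace_space, List.isEmpty_iff.mp h]
  · rw [if_neg (by simpa using h), pvRstrip_append_space]

theorem pvStrip_length_le (cs : List Char) :
    (PySem.Chars.strip cs).length ≤ cs.length := by
  simp only [PySem.Chars.strip, PySem.Chars.rstrip, PySem.Chars.lstrip, List.length_reverse]
  calc (List.dropWhile PySem.Chars.isspace (List.dropWhile PySem.Chars.isspace cs).reverse).length
      ≤ (List.dropWhile PySem.Chars.isspace cs).reverse.length :=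
        (List.dropWhile_sublist _).length_le
    _ ≤ cs.length := by
        rw [List.length_reverse]; exact (List.dropWhile_sublist _).length_le

-- The stripped string fits within the last non-space position of the original string.
theorem pvStrip_le_last (cs : List Char) :
    ((PySem.Chars.strip cs).length : Int) ≤ pvLast cs + 1 := by
  induction cs using List.reverseRecOn with
  | nil => simp [PySem.Chars.strip, PySem.Chars.rstrip, PySem.Chars.lstrip, pvLast,
      PySem.List.enumerate]
  | append_singleton cs c ih =>
      rw [pvLast_append]
      by_cases h : c = ' '
      · simpa [h, pvStrip_append_space] using ih
      · have := pvStrip_length_le (cs ++ [c])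
        simp only [if_pos (by simpa using h : (c : Char) ≠ ' ')]
        simp only [List.length_append, List.length_cons, List.length_nil] at this
        omega

theorem new_sen_eq (string : String) : new_sen string = new_sen_alt string := by
  unfold new_sen new_sen_alt pvWherePunct
  rw [PySem.Chars.slice_eq_listSlice, PySem.List.slice_to_neg_one, PySem.Str.toList_strip]
  set s := PySem.Chars.strip string.toList with hs
  rcases List.eq_nil_or_concat s with hnil | ⟨s', c, hcons⟩
  · rw [hnil]
    simp
  · have hpos : 0 < s.length := by rw [hcons]; simp
    -- replace A's inner scan with [true] and pyGetD on punct with pyGetD on punct.dropLast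
    rw [PySem.List.foldl_congr_mem _ _
      (fun capitals i =>
        (if PySem.List.pyGetD ((s.map (fun c => decide (c ∈ (" .?!".toList)))).dropLast) i false = true
          then capitals ++ [true] else capitals) ++ [false]) []
      (by
        intro acc i hi
        rw [PySem.List.mem_pyRange_one] at hi
        simp only [List.length_map] at hi
        have hlast : i < pvLast string.toList := by
          have := pvStrip_le_last string.toList
          rw [← hs] at this
          omega
        have hinner : pvInnerA string.toList (PySem.List.pyRange (i + 1) (PySem.Str.len string)) =
            [true] := by
          rw [PySem.Str.len_eq, pvInnerA_eq_last string.toList i (by omega), if_pos hlast]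
        have hget : PySem.List.pyGetD (s.map (fun c => decide (c ∈ (" .?!".toList)))) i false =
            PySem.List.pyGetD ((s.map (fun c => decide (c ∈ (" .?!".toList)))).dropLast) i false := by
          rw [PySem.List.pyGetD_eq_getElem _ false (by omega) (by simp; omega),
            PySem.List.pyGetD_eq_getElem _ false (by omega) (by simp; omega)]
          rw [List.getElem_dropLast]
        rw [hinner, hget])]
    have hbound : ((s.map (fun c => decide (c ∈ (" .?!".toList)))).length : Int) - 1 =
        (((s.map (fun c => decide (c ∈ (" .?!".toList)))).dropLast).length : Int) := by
      simp; omega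
    rw [hbound,
      PySem.List.foldl_pyRange_zero_pyGetD' ((s.map (fun c => decide (c ∈ (" .?!".toList)))).dropLast)
        false (fun capitals p => (if p = true then capitals ++ [true] else capitals) ++ [false]) [],
      ← List.map_dropLast, List.foldl_map]
    refine PySem.List.foldl_congr_mem _ _ _ _ (fun acc c _ => ?_)
    by_cases h : c ∈ (" .?!".toList) <;> simp [h]

-- ===== VERDICT (by name: the statement is the Claim_ definition above) =====
theorem new_sen_spec : Claim_equal_new_sen := by
  intro string _
  exact new_sen_eq string
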